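-- pv_equiv track=rewrite | github.com/inveniosoftware/invenio | invenio/utils/persistentid.py | is_issn
-- ===== SOURCE A (Python) =====
-- def _convert_x_to_10(x):
--     """Convert char to int with X being converted to 10."""
--     return int(x) if x != 'X' else 10
--
-- def is_issn(val):
--     """Test if argument is an ISSN number."""
--     try:
--         val = val.replace("-", "").replace(" ", "").upper()
--         if len(val) != 8:
--             return False
--         r = sum([(8 - i) * (_convert_x_to_10(x)) for i, x in enumerate(val)])
--         return not (r % 11)
--     except ValueError:
--         return False
-- ===== SOURCE B (Python) =====
-- def is_issn(val):
--     """Test if argument is an ISSN number."""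
--     s = val.replace("-", "").replace(" ", "").upper()
--     if len(s) != 8:
--         return False
--     if any(ch != 'X' and not ch.isdigit() for ch in s):
--         return False
--     # multiplication-free mod-11 check: double accumulation gives
--     # u = sum of prefix sums = sum_i (8 - i) * v_i
--     t = u = 0
--     for ch in s:
--         t += 10 if ch == 'X' else ord(ch) - 48
--         u += t
--     return u % 11 == 0
-- ===== Notes on version B (the rewrite author's own statement) =====
-- stated objective: alternative
-- what changed: B validates all characters in a separate staged pass, then replaces A's weighted sum (8-i)*value with a multiplication-free double-accumulation (running sum t and running sum-of-prefix-sums u, correct since u = sum_i (8-i)*v_i) and no try/except.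
import Mathlib
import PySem

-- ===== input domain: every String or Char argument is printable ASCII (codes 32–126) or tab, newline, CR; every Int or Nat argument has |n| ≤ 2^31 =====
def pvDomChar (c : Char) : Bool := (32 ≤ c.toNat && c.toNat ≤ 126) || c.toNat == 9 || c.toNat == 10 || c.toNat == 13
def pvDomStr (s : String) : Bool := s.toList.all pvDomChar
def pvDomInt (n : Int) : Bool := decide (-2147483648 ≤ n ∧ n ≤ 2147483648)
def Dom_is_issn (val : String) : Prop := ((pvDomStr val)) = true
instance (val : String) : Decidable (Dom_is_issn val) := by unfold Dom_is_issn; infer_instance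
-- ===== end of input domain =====

-- B replaces A's try/except weighted-sum test by a staged validation pass followed by a
-- multiplication-free double accumulation (sum of prefix sums) mod 11 (objective: alternative).

-- shared first line of both Pythons: val.replace("-", "").replace(" ", "").upper()
def issnNorm (s : List Char) : List Char :=
  PySem.Chars.upper (PySem.Chars.replace (PySem.Chars.replace s ['-'] []) [' '] [])

-- ===== PORT A =====
-- _convert_x_to_10: int(x) if x != 'X' else 10  (int raises ValueError → none)
def convX10 (x : Char) : Option Int :=
  if x ≠ 'X' then PySem.Int.ofChars? [x] else some 10

def is_issn_core (v : List Char) : Bool :=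
  if v.length ≠ 8 then false
  else
    -- [(8 - i) * _convert_x_to_10(x) for i, x in enumerate(val)], summed; a ValueError → except → False
    match (PySem.List.enumerate v 0).mapM
        (fun p => (convX10 p.2).map (fun x => ((8 : Int) - p.1) * x)) with
    | none => false
    | some terms => decide (PySem.Int.mod terms.sum 11 = 0)   -- not (r % 11)

def is_issn (val : String) : Bool := is_issn_core (issnNorm val.toList)

-- ===== PORT B =====
-- 10 if ch == 'X' else ord(ch) - 48
def issnVal (ch : Char) : Int := if ch == 'X' then 10 else (ch.toNat : Int) - 48

def is_issn_alt_core (s : List Char) : Bool :=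
  if s.length ≠ 8 then false
  -- any(ch != 'X' and not ch.isdigit() for ch in s)
  else if s.any (fun ch => ch != 'X' && !PySem.Chars.isdigit ch) then false
  else
    -- t = u = 0; for ch in s: t += 10 if ch == 'X' else ord(ch) - 48; u += t
    let p := s.foldl (fun (p : Int × Int) ch => (p.1 + issnVal ch, p.2 + (p.1 + issnVal ch))) (0, 0)
    decide (PySem.Int.mod p.2 11 = 0)

def is_issn_alt (val : String) : Bool := is_issn_alt_core (issnNorm val.toList)

-- ===== PRECONDITION & SPEC =====
def Spec_is_issn (val : String) (out : Bool) : Prop := out = is_issn_alt val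
instance (val : String) (out : Bool) : Decidable (Spec_is_issn val out) := by unfold Spec_is_issn; infer_instance

-- ===== CLAIM (what is proved, stated in full; the proofs are below) =====
def Claim_equal_is_issn : Prop := ∀ (val : String), Dom_is_issn val → Spec_is_issn val (is_issn val)

-- ===== LEMMAS AND PROOFS =====

-- per-character agreement: A's int()-with-X conversion returns exactly issnVal where B's
-- validation pass accepts, and none exactly where it rejects
def issnCharOk (c : Char) : Bool :=
  decide (convX10 c = (if (c == 'X' || PySem.Chars.isdigit c) then some (issnVal c) else none))

set_option maxRecDepth 10000 in
lemma issnCharOk_all : ∀ n ∈ List.range 127, issnCharOk (Char.ofNat n) = true := by decide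

lemma conv_eq_val (c : Char) (h : c.toNat < 127) :
    convX10 c = (if (c == 'X' || PySem.Chars.isdigit c) then some (issnVal c) else none) := by
  have := issnCharOk_all c.toNat (List.mem_range.mpr h)
  rw [Char.ofNat_toNat] at this
  exact of_decide_eq_true this

-- B's rejection test is the negation of the per-character validity condition
lemma bad_eq (c : Char) :
    (c != 'X' && !PySem.Chars.isdigit c) = !(c == 'X' || PySem.Chars.isdigit c) := by
  cases h : (c == 'X') <;> simp [bne, h]

-- replacing a single character by the empty string is a filter
lemma replace_go_filter (d : Char) :
    ∀ (l acc : List Char),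
      PySem.Chars.replace.go [d] [] l.length l acc = acc.reverse ++ l.filter (fun c => !(c == d)) := by
  intro l
  induction l with
  | nil => intro acc; simp [PySem.Chars.replace.go]
  | cons c t ih =>
    intro acc
    simp only [List.length_cons, PySem.Chars.replace.go, List.filter]
    by_cases hc : d = c
    · subst hc
      simp only [BEq.rfl, Bool.true_and, List.isPrefixOf]
      simpa using ih acc
    · have hne : (d == c) = false := by simp [hc]
      have hcd : (c == d) = false := beq_eq_false_iff_ne.mpr (Ne.symm hc)
      simp only [List.isPrefixOf, hne, Bool.false_and, if_neg (by simp : ¬ false = true)]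
      rw [ih (c :: acc)]
      simp [hcd]

lemma replace_single (d : Char) (l : List Char) :
    PySem.Chars.replace l [d] [] = l.filter (fun c => !(c == d)) := by
  simp only [PySem.Chars.replace, List.isEmpty]
  exact replace_go_filter d l []

lemma mem_issnNorm_lt (val : String) (h : Dom_is_issn val) :
    ∀ c ∈ issnNorm val.toList, c.toNat < 127 := by
  intro c hc
  unfold issnNorm at hc
  rw [replace_single, replace_single] at hc
  simp only [PySem.Chars.upper, List.mem_map, List.mem_filter] at hc
  obtain ⟨b, ⟨⟨hb, -⟩, -⟩, rfl⟩ := hc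
  have hdom : pvDomChar b = true := by
    have hall := h
    unfold Dom_is_issn pvDomStr at hall
    exact List.all_eq_true.mp hall b hb
  have hble : b.toNat < 127 := by
    simp only [pvDomChar, Bool.or_eq_true, Bool.and_eq_true, decide_eq_true_eq, beq_iff_eq] at hdom
    omega
  unfold PySem.Chars.upperChar
  split
  · have hv : (b.toNat - 32).isValidChar := Or.inl (by omega)
    simp [Char.ofNat, hv, Char.ofNatAux]
    omega
  · exact hble

-- the heart of the claim: on a character list whose members are ASCII, the two cores agree
set_option maxHeartbeats 1000000 in
lemma core_eq (v : List Char) (hmem : ∀ c ∈ v, c.toNat < 127) :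
    is_issn_core v = is_issn_alt_core v := by
  unfold is_issn_core is_issn_alt_core
  by_cases hl : v.length = 8
  · simp only [hl, if_neg (by omega : ¬ (8 : Nat) ≠ 8)]
    obtain ⟨c0, c1, c2, c3, c4, c5, c6, c7, rfl⟩ :
        ∃ c0 c1 c2 c3 c4 c5 c6 c7, v = [c0, c1, c2, c3, c4, c5, c6, c7] := by
      match v, hl with
      | [c0, c1, c2, c3, c4, c5, c6, c7], _ => exact ⟨c0, c1, c2, c3, c4, c5, c6, c7, rfl⟩
    have h0 := conv_eq_val c0 (hmem c0 (by simp))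
    have h1 := conv_eq_val c1 (hmem c1 (by simp))
    have h2 := conv_eq_val c2 (hmem c2 (by simp))
    have h3 := conv_eq_val c3 (hmem c3 (by simp))
    have h4 := conv_eq_val c4 (hmem c4 (by simp))
    have h5 := conv_eq_val c5 (hmem c5 (by simp))
    have h6 := conv_eq_val c6 (hmem c6 (by simp))
    have h7 := conv_eq_val c7 (hmem c7 (by simp))
    simp only [PySem.List.enumerate_cons, PySem.List.enumerate_nil, List.mapM_cons, List.mapM_nil,
      List.any_cons, List.any_nil, List.foldl, h0, h1, h2, h3, h4, h5, h6, h7,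
      bad_eq c0, bad_eq c1, bad_eq c2, bad_eq c3, bad_eq c4, bad_eq c5, bad_eq c6, bad_eq c7]
    cases e0 : (c0 == 'X' || PySem.Chars.isdigit c0)
    · simp
    cases e1 : (c1 == 'X' || PySem.Chars.isdigit c1)
    · simp
    cases e2 : (c2 == 'X' || PySem.Chars.isdigit c2)
    · simp
    cases e3 : (c3 == 'X' || PySem.Chars.isdigit c3)
    · simp
    cases e4 : (c4 == 'X' || PySem.Chars.isdigit c4)
    · simp
    cases e5 : (c5 == 'X' || PySem.Chars.isdigit c5)
    · simp
    cases e6 : (c6 == 'X' || PySem.Chars.isdigit c6)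
    · simp
    cases e7 : (c7 == 'X' || PySem.Chars.isdigit c7)
    · simp
    -- all eight characters valid: both sides are mod-11 tests of the same integer
    simp only [if_true, Bool.not_true, Bool.or_self, Bool.false_eq_true, if_false, Option.map_some, Option.pure_def,
      Option.bind_eq_bind, Option.bind_some, List.sum_cons, List.sum_nil]
    rw [decide_eq_decide,
        PySem.Int.mod_eq_emod_of_pos (by norm_num : (0 : Int) < 11),
        PySem.Int.mod_eq_emod_of_pos (by norm_num : (0 : Int) < 11)]
    constructor <;> intro h <;> omega
  · simp only [if_pos hl]

-- ===== VERDICT (by name: the statement is the Claim_ definition above) =====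
theorem is_issn_spec : Claim_equal_is_issn := by
  intro val hDom
  unfold Spec_is_issn is_issn is_issn_alt
  exact core_eq _ (mem_issnNorm_lt val hDom)
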